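-- pv_equiv track=rewrite | github.com/N-Ry/ModelConverter | utils/RectBoxUVAligner.py | min_square_size
-- ===== SOURCE A (Python) =====
-- def can_pack(L, rectangles) -> bool:
--     x = 0
--     y = 0
--     shelf_height = 0
--
--     for w, h in rectangles:
--         if w > L or h > L:
--             return False  # 正方形に入らない
--
--         if x + w <= L:
--             x += w
--             shelf_height = max(shelf_height, h)
--         else:
--             y += shelf_height
--             if y + h > L:
--                 return False
--             x = w
--             shelf_height = h
--
--     return True
--
-- def min_square_size(rectangles):
--     # 下限: 最大幅・高さのどちらか
--     left = max(max(w for w, h in rectangles), max(h for w, h in rectangles))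
--
--     # 上限: 全面を縦か横に並べたとき（単純な合計）
--     right = sum(max(w, h) for w, h in rectangles)
--
--     while left < right:
--         mid = (left + right) // 2
--         if can_pack(mid, rectangles):
--             right = mid
--         else:
--             left = mid + 1
--     return left
-- ===== SOURCE B (Python) =====
-- def _take(L, rects):
--     """Split a nonempty list into the greedy first shelf and the remainder."""
--     x = rects[0][0]
--     i = 1
--     while i < len(rects) and x + rects[i][0] <= L:
--         x += rects[i][0]
--         i += 1
--     return rects[:i], rects[i:]
--
-- def _fits(L, rects):
--     if any(w > L or h > L for w, h in rects):
--         return False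
--     shelf, rest = _take(L, rects)
--     # the first shelf grows from the empty shelf of height 0
--     y = max(0, max(h for w, h in shelf))
--     while rest:
--         shelf, rest = _take(L, rest)
--         if y + shelf[0][1] > L:
--             return False
--         y += max(h for w, h in shelf)
--     return True
--
-- def _search(lo, hi, rects):
--     if lo >= hi:
--         return lo
--     mid = (lo + hi) // 2
--     if _fits(mid, rects):
--         return _search(lo, mid, rects)
--     return _search(mid + 1, hi, rects)
--
-- def min_square_size(rectangles):
--     sides = [max(w, h) for w, h in rectangles]
--     lo = max(sides)
--     hi = sum(sides)
--     return _search(lo, hi, rectangles)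
-- ===== Notes on version B (the rewrite author's own statement) =====
-- stated objective: alternative
-- what changed: The per-rectangle mutable-cursor feasibility walk is replaced by a shelf-chunking test (split the list into greedy shelves, then check shelf-start heights against the accumulated skyline), the two max passes and the sum pass over the rectangles are fused into one per-rect side list, and the binary-search while loop becomes a recursive minimal-feasible search; same O(n log S) cost.
import Mathlib
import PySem

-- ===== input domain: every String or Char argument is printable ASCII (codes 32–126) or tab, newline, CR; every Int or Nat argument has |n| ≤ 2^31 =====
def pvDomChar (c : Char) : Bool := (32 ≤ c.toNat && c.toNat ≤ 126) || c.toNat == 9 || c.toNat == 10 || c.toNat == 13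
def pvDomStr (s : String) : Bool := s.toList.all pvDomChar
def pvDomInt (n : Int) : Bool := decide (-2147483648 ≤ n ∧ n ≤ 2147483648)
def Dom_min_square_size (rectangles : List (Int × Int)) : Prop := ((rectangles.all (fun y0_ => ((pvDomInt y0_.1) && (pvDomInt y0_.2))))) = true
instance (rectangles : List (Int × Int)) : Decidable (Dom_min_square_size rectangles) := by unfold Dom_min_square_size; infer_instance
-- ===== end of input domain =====

-- B replaces A's mutable-cursor feasibility walk by a shelf-chunking test, fuses the
-- three bound passes into one per-rect side list, and makes the binary search recursive
-- (alternative decomposition, same cost).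

-- ===== PORT A =====
-- the for-loop of can_pack over state (x, y, shelf_height)
def canPackAux (L : Int) : List (Int × Int) → Int → Int → Int → Bool
  | [], _, _, _ => true
  | (w, h) :: rest, x, y, sh =>
    if w > L ∨ h > L then false
    else if x + w ≤ L then canPackAux L rest (x + w) y (max sh h)
    else if y + sh + h > L then false
    else canPackAux L rest w (y + sh) h

def can_pack (L : Int) (rectangles : List (Int × Int)) : Bool :=
  canPackAux L rectangles 0 0 0

-- the while left < right binary-search loop of A
def bsearchA (rectangles : List (Int × Int)) (left right : Int) : Int :=
  if left < right then
    let mid := PySem.Int.floordiv (left + right) 2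
    if can_pack mid rectangles then bsearchA rectangles left mid
    else bsearchA rectangles (mid + 1) right
  else left
termination_by (right - left).toNat
decreasing_by
  · have h1 : left ≤ PySem.Int.floordiv (left + right) 2 := by
      rw [PySem.Int.le_floordiv_iff_mul_le (by omega)]; omega
    have h2 : PySem.Int.floordiv (left + right) 2 < right := by
      rw [PySem.Int.floordiv_lt_iff_lt_mul (by omega)]; omega
    omega
  · have h1 : left ≤ PySem.Int.floordiv (left + right) 2 := by
      rw [PySem.Int.le_floordiv_iff_mul_le (by omega)]; omega
    have h2 : PySem.Int.floordiv (left + right) 2 < right := by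
      rw [PySem.Int.floordiv_lt_iff_lt_mul (by omega)]; omega
    omega

def min_square_size (rectangles : List (Int × Int)) : Int :=
  -- max() over the two generator maxima; Python raises ValueError on [] (outside Pre_), getD 0 is unreached there
  let left := max ((PySem.List.max? (rectangles.map Prod.fst) (fun v => v)).getD 0)
                  ((PySem.List.max? (rectangles.map Prod.snd) (fun v => v)).getD 0)
  let right := rectangles.foldl (fun a p => a + max p.1 p.2) 0
  bsearchA rectangles left right

-- ===== PORT B =====
-- the while-loop of _take over (x, i): split off the rest of the current shelf
def takeShelfAux (L x : Int) : List (Int × Int) → List (Int × Int) × List (Int × Int)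
  | [] => ([], [])
  | (w, h) :: rest =>
    if x + w ≤ L then
      let p := takeShelfAux L (x + w) rest
      ((w, h) :: p.1, p.2)
    else ([], (w, h) :: rest)

-- max(h for w, h in shelf) starting the running max at a
def sideMaxFrom (a : Int) (s : List (Int × Int)) : Int :=
  s.foldl (fun m p => max m p.2) a

theorem takeShelfAux_len (L : Int) :
    ∀ (l : List (Int × Int)) (x : Int), ((takeShelfAux L x l).2).length ≤ l.length := by
  intro l
  induction l with
  | nil => intro x; simp [takeShelfAux]
  | cons p t ih =>
    intro x
    obtain ⟨w, h⟩ := p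
    simp only [takeShelfAux]
    split
    · exact Nat.le_succ_of_le (ih (x + w))
    · simp

-- the while rest: loop of _fits (shelf = (w,h) :: p.1, rest = p.2)
def shelfLoop (L : Int) (y : Int) : List (Int × Int) → Bool
  | [] => true
  | (w, h) :: rest =>
    let p := takeShelfAux L w rest
    if y + h > L then false
    else shelfLoop L (y + sideMaxFrom h p.1) p.2
termination_by l => l.length
decreasing_by
  have := takeShelfAux_len L rest w
  simp only [List.length_cons]
  omega

def fits (L : Int) (rectangles : List (Int × Int)) : Bool :=
  if rectangles.any (fun p => decide (p.1 > L) || decide (p.2 > L)) then false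
  else
    match rectangles with
    | [] => true  -- B only calls _fits on the nonempty input list; total-completion of the port
    | (w, h) :: rest =>
      let p := takeShelfAux L w rest
      shelfLoop L (max 0 (sideMaxFrom h p.1)) p.2

def bsearchB (rectangles : List (Int × Int)) (lo hi : Int) : Int :=
  if lo ≥ hi then lo
  else
    let mid := PySem.Int.floordiv (lo + hi) 2
    if fits mid rectangles then bsearchB rectangles lo mid
    else bsearchB rectangles (mid + 1) hi
termination_by (hi - lo).toNat
decreasing_by
  · have h1 : lo ≤ PySem.Int.floordiv (lo + hi) 2 := by
      rw [PySem.Int.le_floordiv_iff_mul_le (by omega)]; omega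
    have h2 : PySem.Int.floordiv (lo + hi) 2 < hi := by
      rw [PySem.Int.floordiv_lt_iff_lt_mul (by omega)]; omega
    omega
  · have h1 : lo ≤ PySem.Int.floordiv (lo + hi) 2 := by
      rw [PySem.Int.le_floordiv_iff_mul_le (by omega)]; omega
    have h2 : PySem.Int.floordiv (lo + hi) 2 < hi := by
      rw [PySem.Int.floordiv_lt_iff_lt_mul (by omega)]; omega
    omega

def min_square_size_alt (rectangles : List (Int × Int)) : Int :=
  let sides := rectangles.map (fun p => max p.1 p.2)
  let lo := (PySem.List.max? sides (fun v => v)).getD 0  -- Python max() raises on [] (outside Pre_)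
  let hi := sides.sum
  bsearchB rectangles lo hi

-- ===== PRECONDITION & SPEC =====
-- Python A raises ValueError (max of an empty sequence) on the empty list
def Pre_min_square_size (rectangles : List (Int × Int)) : Prop := rectangles ≠ []
instance (rectangles : List (Int × Int)) : Decidable (Pre_min_square_size rectangles) := by
  unfold Pre_min_square_size; infer_instance

def pvWitness_min_square_size : (List (Int × Int)) := [(3, 2), (1, 2)]

def Spec_min_square_size (rectangles : List (Int × Int)) (out : Int) : Prop := out = min_square_size_alt rectangles
instance (rectangles : List (Int × Int)) (out : Int) : Decidable (Spec_min_square_size rectangles out) := by unfold Spec_min_square_size; infer_instance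

-- ===== CLAIM (what is proved, stated in full; the proofs are below) =====
def Claim_equal_min_square_size : Prop := ∀ (rectangles : List (Int × Int)), Dom_min_square_size rectangles → Pre_min_square_size rectangles → Spec_min_square_size rectangles (min_square_size rectangles)

-- ===== LEMMAS AND PROOFS =====

-- A's canPackAux is false as soon as some remaining rectangle exceeds L
theorem canPackAux_big (L : Int) :
    ∀ (rs : List (Int × Int)) (x y sh : Int),
      rs.any (fun p => decide (p.1 > L) || decide (p.2 > L)) = true →
      canPackAux L rs x y sh = false := by
  intro rs
  induction rs with
  | nil => simp
  | cons p t ih =>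
    intro x y sh hany
    obtain ⟨w, h⟩ := p
    simp only [List.any_cons, Bool.or_eq_true, decide_eq_true_eq] at hany
    simp only [canPackAux]
    split
    · rfl
    · rename_i hn
      have ht : t.any (fun p => decide (p.1 > L) || decide (p.2 > L)) = true := by
        rcases hany with hb | ht
        · exact absurd hb hn
        · exact ht
      split
      · exact ih _ _ _ ht
      · split
        · rfl
        · exact ih _ _ _ ht

-- running max distributes over an extra lower seed
theorem sideMaxFrom_hoist :
    ∀ (s : List (Int × Int)) (c a : Int), max c (sideMaxFrom a s) = sideMaxFrom (max c a) s := by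
  intro s
  induction s with
  | nil => intro c a; simp [sideMaxFrom]
  | cons p t ih =>
    intro c a
    simp only [sideMaxFrom, List.foldl_cons] at *
    rw [ih c (max a p.2)]
    have : max c (max a p.2) = max (max c a) p.2 := by omega
    rw [this]

-- with no oversized rectangle, A's walk from state (x, y, sh) equals B's shelf chunking
theorem canPackAux_eq_shelfLoop (L : Int) :
    ∀ (rs : List (Int × Int)) (x y sh : Int),
      rs.any (fun p => decide (p.1 > L) || decide (p.2 > L)) = false →
      canPackAux L rs x y sh =
        shelfLoop L (y + sideMaxFrom sh (takeShelfAux L x rs).1) (takeShelfAux L x rs).2 := by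
  intro rs
  induction rs with
  | nil => intro x y sh _; simp [canPackAux, takeShelfAux, shelfLoop, sideMaxFrom]
  | cons p t ih =>
    intro x y sh hany
    obtain ⟨w, h⟩ := p
    simp only [List.any_cons, Bool.or_eq_false_iff, decide_eq_false_iff_not] at hany
    obtain ⟨⟨hw, hh⟩, ht⟩ := hany
    simp only [canPackAux, takeShelfAux]
    have hnbig : ¬ (w > L ∨ h > L) := by omega
    rw [if_neg hnbig]
    by_cases hx : x + w ≤ L
    · rw [if_pos hx, if_pos hx]
      rw [ih (x + w) y (max sh h) ht]
      rfl
    · rw [if_neg hx, if_neg hx]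
      rw [shelfLoop]
      simp only [sideMaxFrom, List.foldl_nil]
      by_cases hy : y + sh + h > L
      · rw [if_pos hy, if_pos (by omega : y + sh + h > L)]
      · rw [if_neg hy, if_neg (by omega : ¬ y + sh + h > L)]
        rw [ih w (y + sh) h ht]
        rfl

theorem can_pack_eq_fits (L : Int) (rects : List (Int × Int)) :
    can_pack L rects = fits L rects := by
  unfold can_pack fits
  by_cases hbig : rects.any (fun p => decide (p.1 > L) || decide (p.2 > L)) = true
  · rw [if_pos hbig, canPackAux_big L rects 0 0 0 hbig]
  · rw [if_neg hbig]
    match rects with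
    | [] => simp [canPackAux]
    | (w, h) :: rest =>
      have hany := eq_false_of_ne_true hbig
      rw [canPackAux_eq_shelfLoop L ((w, h) :: rest) 0 0 0 hany]
      simp only [List.any_cons, Bool.or_eq_false_iff, decide_eq_false_iff_not] at hany
      have hw : w ≤ L := by omega
      simp only [takeShelfAux, zero_add, if_pos hw]
      have : sideMaxFrom 0 ((w, h) :: (takeShelfAux L w rest).1)
           = max 0 (sideMaxFrom h (takeShelfAux L w rest).1) := by
        rw [sideMaxFrom_hoist]
        simp [sideMaxFrom]
      simp only [sideMaxFrom, List.foldl_cons] at this ⊢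
      rw [this]

theorem bsearch_eq (rects : List (Int × Int)) :
    ∀ (n : Nat) (lo hi : Int), (hi - lo).toNat ≤ n → bsearchA rects lo hi = bsearchB rects lo hi := by
  intro n
  induction n with
  | zero =>
    intro lo hi hle
    have : ¬ lo < hi := by omega
    rw [bsearchA, bsearchB, if_neg this, if_pos (by omega : lo ≥ hi)]
  | succ m ih =>
    intro lo hi hle
    rw [bsearchA, bsearchB]
    by_cases hlt : lo < hi
    · rw [if_pos hlt, if_neg (by omega : ¬ lo ≥ hi)]
      have h1 : lo ≤ PySem.Int.floordiv (lo + hi) 2 := by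
        rw [PySem.Int.le_floordiv_iff_mul_le (by omega)]; omega
      have h2 : PySem.Int.floordiv (lo + hi) 2 < hi := by
        rw [PySem.Int.floordiv_lt_iff_lt_mul (by omega)]; omega
      simp only [can_pack_eq_fits]
      by_cases hc : fits (PySem.Int.floordiv (lo + hi) 2) rects = true
      · rw [if_pos hc, if_pos hc]
        exact ih lo _ (by omega)
      · rw [if_neg hc, if_neg hc]
        exact ih _ hi (by omega)
    · rw [if_neg hlt, if_pos (by omega : lo ≥ hi)]

theorem foldl_max_pair :
    ∀ (t : List (Int × Int)) (a b : Int),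
      max (t.foldl (fun m p => max m p.1) a) (t.foldl (fun m p => max m p.2) b)
        = t.foldl (fun m p => max m (max p.1 p.2)) (max a b) := by
  intro t
  induction t with
  | nil => intro a b; simp
  | cons q s ih =>
    intro a b
    simp only [List.foldl_cons]
    rw [ih (max a q.1) (max b q.2)]
    have : max (max a q.1) (max b q.2) = max (max a b) (max q.1 q.2) := by omega
    rw [this]

theorem lo_eq (p : Int × Int) (t : List (Int × Int)) :
    max ((PySem.List.max? ((p :: t).map Prod.fst) (fun v => v)).getD 0)
        ((PySem.List.max? ((p :: t).map Prod.snd) (fun v => v)).getD 0)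
      = (PySem.List.max? ((p :: t).map (fun (q : Int × Int) => max q.1 q.2)) (fun v => v)).getD 0 := by
  simp only [List.map_cons, PySem.List.max?_id_cons, Option.getD_some, List.foldl_map]
  exact foldl_max_pair t p.1 p.2


theorem hi_eq (l : List (Int × Int)) :
    l.foldl (fun a p => a + max p.1 p.2) 0 = (l.map (fun q => max q.1 q.2)).sum := by
  rw [PySem.List.foldl_add]
  simp

-- ===== VERDICT (by name: the statement is the Claim_ definition above) =====
theorem min_square_size_spec : Claim_equal_min_square_size := by
  intro rects _ hpre
  unfold Spec_min_square_size min_square_size min_square_size_alt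
  obtain ⟨p, t, rfl⟩ : ∃ p t, rects = p :: t := by
    cases rects with
    | nil => exact absurd rfl hpre
    | cons p t => exact ⟨p, t, rfl⟩
  simp only [lo_eq, hi_eq]
  exact bsearch_eq _ _ _ _ le_rfl
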